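-- pv_equiv track=rewrite | github.com/bmwalters/python-cuetoolsdb | cuetoolsdb/zlib_crc.py | crc32_subtract
-- ===== SOURCE A (Python) =====
-- def gf2_matrix_square(square, mat):
--   for n in range(0, 32):
--     square[n] = gf2_matrix_times(mat, mat[n])
--   return square
--
-- def gf2_matrix_times(mat, vec):
--   sum = 0
--   i = 0
--   while vec:
--     if (vec & 1):
--       sum = sum ^ mat[i]
--     vec = (vec >> 1) & 0x7FFFFFFF
--     i = i + 1
--   return sum
--
-- crc32_reciprocal_poly = 0xdb710641
--
-- def crc32_subtract(crc1, crc2, len2):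
--   """
--   https://stackoverflow.com/a/59139701
--   """
--   even = [0] * 32
--   odd = []
--   if (len2 == 0): # degenerate case
--     return crc1
--
--   for n in range(1, 32):
--     odd.append(1 << n)
--
--   odd.append(crc32_reciprocal_poly)
--
--   even = gf2_matrix_square(even, odd)
--   odd = gf2_matrix_square(odd, even)
--
--   crc1 ^= crc2
--
--   while (len2 != 0):
--     even = gf2_matrix_square(even, odd)
--     if (len2 & 1):
--       crc1 = gf2_matrix_times(even, crc1)
--     len2 = len2 >> 1
--
--     if (len2 == 0):
--       break
--
--     odd = gf2_matrix_square(odd, even)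
--     if (len2 & 1):
--       crc1 = gf2_matrix_times(odd, crc1)
--     len2 = len2 >> 1
--
--   return crc1
-- ===== SOURCE B (Python) =====
-- CRC32_RECIPROCAL_POLY = 0xdb710641
-- MASK32 = 0xFFFFFFFF
--
-- def _mulx(a):
--   # multiply the polynomial a by x, reducing x^32 to the reciprocal polynomial
--   if a & 0x80000000:
--     return ((a << 1) & MASK32) ^ CRC32_RECIPROCAL_POLY
--   return (a << 1) & MASK32
--
-- def _clmul(a, b):
--   # carry-less product a*b of 32-bit polynomials modulo the reciprocal polynomial
--   s = 0
--   while b: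
--     if b & 1:
--       s = s ^ a
--     a = _mulx(a)
--     b = (b >> 1) & 0x7FFFFFFF
--   return s
--
-- def crc32_subtract(crc1, crc2, len2):
--   # polynomial square-and-multiply: no 32x32 GF(2) matrices at all
--   if len2 == 0:
--     return crc1
--   crc = crc1 ^ crc2
--   p = 0x100  # the polynomial x^8: the operator for one zero byte
--   while len2:
--     if len2 & 1:
--       crc = _clmul(p, crc)
--     p = _clmul(p, p)
--     len2 = len2 >> 1
--   return crc
-- ===== Notes on version B (the rewrite author's own statement) =====
-- stated objective: faster
-- what changed: Replaces the 32x32 GF(2) matrix exponentiation (matrix squarings and matrix-vector products) by square-and-multiply on single 32-bit polynomials: a carry-less multiply modulo the reciprocal polynomial, computing x^(8*len2) applied to crc1^crc2 with no matrices at all.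
import Mathlib
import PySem

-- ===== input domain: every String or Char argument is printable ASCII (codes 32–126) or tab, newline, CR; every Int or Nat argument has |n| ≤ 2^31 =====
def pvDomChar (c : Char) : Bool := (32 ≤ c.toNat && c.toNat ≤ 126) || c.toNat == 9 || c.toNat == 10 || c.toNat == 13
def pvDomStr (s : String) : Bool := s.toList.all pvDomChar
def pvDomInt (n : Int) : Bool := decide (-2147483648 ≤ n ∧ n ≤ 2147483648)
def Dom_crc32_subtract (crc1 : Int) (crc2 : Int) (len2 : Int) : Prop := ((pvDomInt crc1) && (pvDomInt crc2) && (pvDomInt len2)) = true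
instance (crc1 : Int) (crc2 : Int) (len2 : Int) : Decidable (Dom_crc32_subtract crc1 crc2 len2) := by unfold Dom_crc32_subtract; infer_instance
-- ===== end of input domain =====

-- B replaces A's 32x32 GF(2) matrix exponentiation by square-and-multiply on
-- single 32-bit polynomials modulo the reciprocal polynomial (objective: faster).

-- ===== PORT A =====
-- inner while-loop of gf2_matrix_times after the first step: vec has been masked
-- with 0x7FFFFFFF, so it is a Nat; matrix rows and the running xor are nonnegative
def gf2TimesNat (mat : List Nat) (vec : Nat) (i : Nat) (sum : Nat) : Nat :=
  if vec = 0 then sum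
  else
    gf2TimesNat mat ((vec >>> 1) &&& 0x7FFFFFFF) (i + 1)
      (if vec &&& 1 = 1 then sum ^^^ mat.getD i 0 else sum)
termination_by vec
decreasing_by
  have h : (vec >>> 1) &&& 0x7FFFFFFF ≤ vec >>> 1 := Nat.and_le_left
  have h2 : vec >>> 1 = vec / 2 := Nat.shiftRight_one vec
  omega

-- gf2_matrix_times(mat, vec): the first iteration handles a possibly negative
-- Python int exactly (bit 0, then arithmetic shift and the 0x7FFFFFFF mask);
-- the masked tail is the Nat loop above
def gf2_matrix_times_port (mat : List Nat) (vec : Int) : Nat :=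
  if vec = 0 then 0
  else
    gf2TimesNat mat ((PySem.Int.band (vec >>> (1:Nat)) 0x7FFFFFFF)).toNat 1
      (if PySem.Int.band vec 1 = 1 then mat.getD 0 0 else 0)

-- gf2_matrix_square(square, mat): square is fully overwritten, never read
def gf2_matrix_square_port (mat : List Nat) : List Nat :=
  (List.range 32).map (fun n => gf2_matrix_times_port mat ((mat.getD n 0 : Nat) : Int))

def crc32_reciprocal_poly : Nat := 0xdb710641

-- A's while-loop on the Nat value of len2 (for len2 < 0 the Python loop never
-- returns, and neither does B's, so both ports run on len2.toNat); the
-- two-phase body with the mid-loop break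
def crc32ALoop (even odd : List Nat) (crc1 : Int) (len2 : Nat) : Int :=
  if len2 = 0 then crc1
  else
    let even' := gf2_matrix_square_port odd
    let crc1' := if len2 &&& 1 = 1 then ((gf2_matrix_times_port even' crc1 : Nat) : Int) else crc1
    let len2' := len2 >>> 1
    if len2' = 0 then crc1'
    else
      let odd' := gf2_matrix_square_port even'
      let crc1'' := if len2' &&& 1 = 1 then ((gf2_matrix_times_port odd' crc1' : Nat) : Int) else crc1'
      crc32ALoop even' odd' crc1'' (len2' >>> 1)
termination_by len2
decreasing_by
  have h1 : len2 >>> 1 = len2 / 2 := Nat.shiftRight_one len2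
  have h2 : len2 >>> 1 >>> 1 = len2 >>> 1 / 2 := Nat.shiftRight_one _
  omega

def crc32_subtract (crc1 : Int) (crc2 : Int) (len2 : Int) : Int :=
  if len2 = 0 then crc1
  else
    let odd := ((List.range' 1 31).map (fun n => (1 <<< n : Nat))) ++ [crc32_reciprocal_poly]
    let even := gf2_matrix_square_port odd
    let odd' := gf2_matrix_square_port even
    crc32ALoop even odd' (PySem.Int.bxor crc1 crc2) len2.toNat

-- ===== PORT B =====
-- _mulx(a): multiply the polynomial a by x, reducing x^32 to the reciprocal poly
def pmulx (a : Nat) : Nat :=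
  if a &&& 0x80000000 ≠ 0 then ((a <<< 1) &&& 0xFFFFFFFF) ^^^ 0xdb710641
  else (a <<< 1) &&& 0xFFFFFFFF

-- _clmul's while-loop after the first step: b has been masked, so it is a Nat
def clmulNat (a : Nat) (b : Nat) (s : Nat) : Nat :=
  if b = 0 then s
  else
    clmulNat (pmulx a) ((b >>> 1) &&& 0x7FFFFFFF)
      (if b &&& 1 = 1 then s ^^^ a else s)
termination_by b
decreasing_by
  have h : (b >>> 1) &&& 0x7FFFFFFF ≤ b >>> 1 := Nat.and_le_left
  have h2 : b >>> 1 = b / 2 := Nat.shiftRight_one b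
  omega

-- _clmul(a, b): first iteration on the possibly negative Python int b
def clmul_port (a : Nat) (b : Int) : Nat :=
  if b = 0 then 0
  else
    clmulNat (pmulx a) ((PySem.Int.band (b >>> (1:Nat)) 0x7FFFFFFF)).toNat
      (if PySem.Int.band b 1 = 1 then a else 0)

-- B's while-loop on the Nat value of len2
def crc32BLoop (p : Nat) (crc : Int) (len2 : Nat) : Int :=
  if len2 = 0 then crc
  else
    let crc' := if len2 &&& 1 = 1 then ((clmul_port p crc : Nat) : Int) else crc
    crc32BLoop (clmul_port p (p : Int)) crc' (len2 >>> 1)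
termination_by len2
decreasing_by
  have h1 : len2 >>> 1 = len2 / 2 := Nat.shiftRight_one len2
  omega

def crc32_subtract_alt (crc1 : Int) (crc2 : Int) (len2 : Int) : Int :=
  if len2 = 0 then crc1
  else crc32BLoop 0x100 (PySem.Int.bxor crc1 crc2) len2.toNat

-- ===== PRECONDITION & SPEC =====
def Spec_crc32_subtract (crc1 : Int) (crc2 : Int) (len2 : Int) (out : Int) : Prop := out = crc32_subtract_alt crc1 crc2 len2
instance (crc1 : Int) (crc2 : Int) (len2 : Int) (out : Int) : Decidable (Spec_crc32_subtract crc1 crc2 len2 out) := by unfold Spec_crc32_subtract; infer_instance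

-- ===== CLAIM (what is proved, stated in full; the proofs are below) =====
def Claim_equal_crc32_subtract : Prop := ∀ (crc1 : Int) (crc2 : Int) (len2 : Int), Dom_crc32_subtract crc1 crc2 len2 → Spec_crc32_subtract crc1 crc2 len2 (crc32_subtract crc1 crc2 len2)

-- ===== LEMMAS AND PROOFS =====

-- proof-side vocabulary: iterated multiplication by x, the polynomial matrix,
-- and the pure-Nat carry-less product
def mulxIter : Nat → Nat → Nat
  | 0, p => p
  | n + 1, p => pmulx (mulxIter n p)

def matOf (p : Nat) : List Nat := (List.range 32).map (fun n => mulxIter n p)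

def pmulN (a : Nat) (b : Nat) : Nat :=
  if b = 0 then 0
  else (if b &&& 1 = 1 then a else 0) ^^^ pmulN (pmulx a) (b >>> 1)
termination_by b
decreasing_by
  have h2 : b >>> 1 = b / 2 := Nat.shiftRight_one b
  omega

def SN (a : Nat) (w : Nat) (n : Nat) : Nat :=
  (List.range n).foldr (fun i acc => (if w.testBit i then mulxIter i a else 0) ^^^ acc) 0

theorem mulxIter_succ' (n p : Nat) : mulxIter (n + 1) p = mulxIter n (pmulx p) := by
  induction n generalizing p with
  | zero => rfl
  | succ n ih => show pmulx (mulxIter (n+1) p) = _; rw [ih]; rfl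

theorem pmulx_zero : pmulx 0 = 0 := by decide

theorem pmulx_lt (a : Nat) : pmulx a < 2 ^ 32 := by
  unfold pmulx
  split
  · exact Nat.xor_lt_two_pow (Nat.lt_of_le_of_lt Nat.and_le_right (by norm_num)) (by norm_num)
  · exact Nat.lt_of_le_of_lt Nat.and_le_right (by norm_num)

theorem mulxIter_lt (n : Nat) {a : Nat} (h : a < 2 ^ 32) : mulxIter n a < 2 ^ 32 := by
  cases n with
  | zero => exact h
  | succ n => exact pmulx_lt _

theorem pmulx_eq (a : Nat) :
    pmulx a = ((a <<< 1) &&& 0xFFFFFFFF) ^^^ (if a.testBit 31 then 0xdb710641 else 0) := by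
  unfold pmulx
  have h : a &&& 0x80000000 = (a.testBit 31).toNat * 2 ^ 31 := Nat.and_two_pow a 31
  cases hb : a.testBit 31 <;> simp [hb] at h ⊢ <;> simp [h]

theorem pmulx_xor (a b : Nat) : pmulx (a ^^^ b) = pmulx a ^^^ pmulx b := by
  rw [pmulx_eq, pmulx_eq, pmulx_eq, Nat.shiftLeft_xor_distrib, Nat.and_xor_distrib_right,
    Nat.testBit_xor]
  cases ha : a.testBit 31 <;> cases hb : b.testBit 31 <;>
    simp [Nat.xor_assoc, Nat.xor_comm, Nat.xor_left_comm]

theorem mulxIter_zero' (n : Nat) : mulxIter n 0 = 0 := by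
  induction n with
  | zero => rfl
  | succ n ih => show pmulx (mulxIter n 0) = 0; rw [ih, pmulx_zero]

theorem mulxIter_xor (n a b : Nat) : mulxIter n (a ^^^ b) = mulxIter n a ^^^ mulxIter n b := by
  induction n with
  | zero => rfl
  | succ n ih => show pmulx (mulxIter n (a ^^^ b)) = _; rw [ih, pmulx_xor]; rfl

theorem pmulN_zero_left (b : Nat) : pmulN 0 b = 0 := by
  induction b using Nat.strong_induction_on with
  | _ b ih =>
    unfold pmulN
    split
    · rfl
    · rename_i hb
      rw [pmulx_zero, ih (b >>> 1) (by have := Nat.shiftRight_one b; omega)]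
      simp

theorem pmulN_xor_left (a₁ a₂ b : Nat) : pmulN (a₁ ^^^ a₂) b = pmulN a₁ b ^^^ pmulN a₂ b := by
  induction b using Nat.strong_induction_on generalizing a₁ a₂ with
  | _ b ih =>
    unfold pmulN
    split
    · rfl
    · rename_i hb
      rw [pmulx_xor, ih (b >>> 1) (by have := Nat.shiftRight_one b; omega)]
      split <;> simp [Nat.xor_assoc, Nat.xor_comm, Nat.xor_left_comm]

theorem pmulN_lt {a : Nat} (h : a < 2 ^ 32) (b : Nat) : pmulN a b < 2 ^ 32 := by
  induction b using Nat.strong_induction_on generalizing a with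
  | _ b ih =>
    unfold pmulN
    split
    · norm_num
    · rename_i hb
      have hr := ih (b >>> 1) (by have := Nat.shiftRight_one b; omega) (pmulx_lt a)
      split
      · exact Nat.xor_lt_two_pow h hr
      · simpa using hr

theorem matOf_getD {p : Nat} {n : Nat} (hn : n < 32) : (matOf p).getD n 0 = mulxIter n p := by
  unfold matOf
  rw [List.getD_eq_getElem?_getD]
  simp [hn]

-- the Nat tails of gf2_matrix_times and _clmul walk in lockstep on a polynomial
-- matrix: row i of matOf p is the a-register after i doublings
theorem gf2TimesNat_eq_clmulNat (p : Nat) : ∀ v i s, v < 2 ^ (32 - i) →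
    gf2TimesNat (matOf p) v i s = clmulNat (mulxIter i p) v s := by
  intro v
  induction v using Nat.strong_induction_on with
  | _ v ih =>
    intro i s hv
    rw [gf2TimesNat, clmulNat]
    by_cases h0 : v = 0
    · simp [h0]
    · simp only [if_neg h0]
      have hi : i < 32 := by
        by_contra hc
        have : 32 - i = 0 := by omega
        rw [this] at hv
        omega
      have hrow : (matOf p).getD i 0 = mulxIter i p := matOf_getD hi
      have hsh : v >>> 1 = v / 2 := Nat.shiftRight_one v
      have hle : (v >>> 1) &&& 0x7FFFFFFF ≤ v >>> 1 := Nat.and_le_left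
      have hpow : 2 ^ (32 - i) = 2 * 2 ^ (32 - (i + 1)) := by
        rw [← pow_succ']
        congr 1
        omega
      have hrec : (v >>> 1) &&& 0x7FFFFFFF < 2 ^ (32 - (i + 1)) := by omega
      rw [hrow, ih ((v >>> 1) &&& 0x7FFFFFFF) (by omega) (i + 1) _ hrec]
      rfl

theorem band_mask_toNat_lt (x : Int) : (PySem.Int.band x 0x7FFFFFFF).toNat < 2 ^ 31 := by
  unfold PySem.Int.band
  split
  · split
    · have h := Nat.and_le_right (n := x.toNat) (m := (0x7FFFFFFF : Int).toNat)
      simp only [Int.toNat_natCast]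
      omega
    · omega
  · split
    · simp only [Int.toNat_natCast]
      omega
    · omega

-- applying the polynomial matrix is carry-less multiplication (any Int vec)
theorem times_matOf (p : Nat) (v : Int) :
    gf2_matrix_times_port (matOf p) v = clmul_port p v := by
  unfold gf2_matrix_times_port clmul_port
  by_cases h0 : v = 0
  · simp [h0]
  · simp only [if_neg h0]
    rw [matOf_getD (by norm_num)]
    have := gf2TimesNat_eq_clmulNat p ((PySem.Int.band (v >>> (1:Nat)) 0x7FFFFFFF)).toNat 1
      (if PySem.Int.band v 1 = 1 then mulxIter 0 p else 0)
      (by simpa using band_mask_toNat_lt (v >>> (1:Nat)))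
    exact this

theorem int_shift_natCast (w : Nat) : ((w : Int) >>> (1:Nat)) = ((w >>> 1 : Nat) : Int) := rfl

theorem band_mask_natCast (w : Nat) :
    PySem.Int.band ((w : Int) >>> (1:Nat)) 0x7FFFFFFF = ((w >>> 1) &&& 0x7FFFFFFF : Nat) := by
  rw [int_shift_natCast]
  have h2 : (0x7FFFFFFF : Int) = ((0x7FFFFFFF : Nat) : Int) := rfl
  rw [h2, PySem.Int.band_natCast]

theorem band_one_natCast (w : Nat) : (PySem.Int.band (w : Int) 1 = 1) ↔ (w &&& 1 = 1) := by
  have h1 : (1 : Int) = ((1 : Nat) : Int) := rfl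
  rw [h1, PySem.Int.band_natCast]
  exact_mod_cast Iff.rfl

theorem clmulNat_eq_pmulN (a : Nat) : ∀ v, v < 2 ^ 31 → ∀ s, clmulNat a v s = s ^^^ pmulN a v := by
  intro v
  induction v using Nat.strong_induction_on generalizing a with
  | _ v ih =>
    intro hv s
    rw [clmulNat, pmulN]
    by_cases h0 : v = 0
    · simp [h0]
    · simp only [if_neg h0]
      have hsh : v >>> 1 = v / 2 := Nat.shiftRight_one v
      have hmask : (v >>> 1) &&& 0x7FFFFFFF = v >>> 1 := by
        have := Nat.and_two_pow_sub_one_eq_mod (v >>> 1) 31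
        norm_num at this ⊢
        rw [this]
        omega
      rw [hmask, ih (v >>> 1) (by omega) (pmulx a) (by omega)]
      split <;> simp [Nat.xor_assoc]

-- _clmul on a nonnegative second argument is the pure-Nat product
theorem clmul_port_natCast (a : Nat) {w : Nat} (hw : w < 2 ^ 32) :
    clmul_port a (w : Int) = pmulN a w := by
  unfold clmul_port
  by_cases h0 : w = 0
  · simp [h0, pmulN]
  · have h0' : (w : Int) ≠ 0 := by exact_mod_cast h0
    simp only [if_neg h0']
    rw [band_mask_natCast, Int.toNat_natCast]
    have hlt : (w >>> 1) &&& 0x7FFFFFFF < 2 ^ 31 :=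
      Nat.lt_of_le_of_lt Nat.and_le_right (by norm_num)
    rw [clmulNat_eq_pmulN (pmulx a) _ hlt]
    conv_rhs => rw [pmulN]
    simp only [if_neg h0]
    have hmask : (w >>> 1) &&& 0x7FFFFFFF = w >>> 1 := by
      have h2 := Nat.and_two_pow_sub_one_eq_mod (w >>> 1) 31
      have hsh : w >>> 1 = w / 2 := Nat.shiftRight_one w
      norm_num at h2 ⊢
      rw [h2]
      omega
    rw [hmask]
    by_cases hb : w &&& 1 = 1
    · simp [band_one_natCast, hb]
    · simp [band_one_natCast, hb]

theorem foldr_xor_init (l : List Nat) (f : Nat → Nat) (c : Nat) :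
    l.foldr (fun i acc => f i ^^^ acc) c = l.foldr (fun i acc => f i ^^^ acc) 0 ^^^ c := by
  induction l with
  | nil => simp
  | cons x xs ih => simp [ih, Nat.xor_assoc]

theorem foldr_xor_split (l : List Nat) (f g : Nat → Nat) :
    l.foldr (fun i acc => (f i ^^^ g i) ^^^ acc) 0 =
      l.foldr (fun i acc => f i ^^^ acc) 0 ^^^ l.foldr (fun i acc => g i ^^^ acc) 0 := by
  induction l with
  | nil => simp
  | cons x xs ih =>
    simp only [List.foldr_cons]
    rw [ih]
    ac_rfl

theorem foldr_xor_congr (l : List Nat) (f g : Nat → Nat) (h : ∀ i ∈ l, f i = g i) :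
    l.foldr (fun i acc => f i ^^^ acc) 0 = l.foldr (fun i acc => g i ^^^ acc) 0 := by
  induction l with
  | nil => rfl
  | cons x xs ih =>
    simp only [List.foldr_cons]
    rw [h x (by simp), ih (fun i hi => h i (by simp [hi]))]

theorem foldr_xor_map (l : List Nat) (f h : Nat → Nat) (h0 : h 0 = 0)
    (hx : ∀ x y, h (x ^^^ y) = h x ^^^ h y) :
    h (l.foldr (fun i acc => f i ^^^ acc) 0) = l.foldr (fun i acc => h (f i) ^^^ acc) 0 := by
  induction l with
  | nil => simpa
  | cons x xs ih => simp [hx, ih]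

theorem SN_zero_w (a n : Nat) : SN a 0 n = 0 := by
  unfold SN
  induction (List.range n) with
  | nil => rfl
  | cons x xs ih => simp [ih]

theorem SN_succ (a w n : Nat) :
    SN a w (n + 1) = (if w.testBit 0 then a else 0) ^^^ SN (pmulx a) (w >>> 1) n := by
  unfold SN
  rw [List.range_succ_eq_map, List.foldr_cons, List.foldr_map]
  congr 1
  apply foldr_xor_congr
  intro i _
  rw [Nat.testBit_shiftRight, mulxIter_succ', Nat.add_comm 1 i]

theorem pmulN_eq_SN (a : Nat) : ∀ n w, w < 2 ^ n → pmulN a w = SN a w n := by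
  intro n
  induction n generalizing a with
  | zero =>
    intro w hw
    have : w = 0 := Nat.lt_one_iff.mp (by simpa using hw)
    simp [this, pmulN, SN]
  | succ n ih =>
    intro w hw
    rw [pmulN, SN_succ]
    by_cases h0 : w = 0
    · simp [h0, SN_zero_w]
    · simp only [if_neg h0]
      have hsh : w >>> 1 = w / 2 := Nat.shiftRight_one w
      rw [ih (pmulx a) (w >>> 1) (by omega)]
      congr 1
      simp [Nat.and_one_is_mod, Nat.testBit_zero]

theorem SN_xor_w (a x y n : Nat) : SN a (x ^^^ y) n = SN a x n ^^^ SN a y n := by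
  unfold SN
  rw [← foldr_xor_split]
  apply foldr_xor_congr
  intro i _
  rw [Nat.testBit_xor]
  cases hx : x.testBit i <;> cases hy : y.testBit i <;> simp

-- x^32 reduces to the reciprocal polynomial: both sides are linear in q,
-- so 32 kernel computations on the basis vectors settle it
theorem linear_ext (f g : Nat → Nat) (hf0 : f 0 = 0) (hg0 : g 0 = 0)
    (hfx : ∀ x y, f (x ^^^ y) = f x ^^^ f y) (hgx : ∀ x y, g (x ^^^ y) = g x ^^^ g y)
    (hbase : ∀ j, j < 32 → f (2 ^ j) = g (2 ^ j)) :
    ∀ q, q < 2 ^ 32 → f q = g q := by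
  suffices h : ∀ k, k ≤ 32 → ∀ q, q < 2 ^ k → f q = g q from h 32 le_rfl
  intro k
  induction k with
  | zero =>
    intro _ q hq
    have : q = 0 := by omega
    simp [this, hf0, hg0]
  | succ k ih =>
    intro hk q hq
    by_cases hsmall : q < 2 ^ k
    · exact ih (by omega) q hsmall
    · have hsmall : 2 ^ k ≤ q := Nat.le_of_not_lt hsmall
      have hbit : q.testBit k = true := by
        have hd : q / 2 ^ k = 1 :=
          Nat.div_eq_of_lt_le (by simpa using hsmall) (by simpa [pow_succ, Nat.mul_comm] using hq)
        simp [Nat.testBit, Nat.shiftRight_eq_div_pow, hd]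
      have hxq : q ^^^ 2 ^ k = q % 2 ^ k := by
        apply Nat.eq_of_testBit_eq
        intro i
        rcases lt_trichotomy i k with hi | hi | hi
        · simp [Nat.testBit_mod_two_pow, hi, Nat.ne_of_gt hi]
        · subst hi
          simp [Nat.testBit_mod_two_pow, hbit]
        · have hqi : q.testBit i = false :=
            Nat.testBit_lt_two_pow (lt_of_lt_of_le hq (Nat.pow_le_pow_right (by norm_num) hi))
          simp [Nat.testBit_mod_two_pow, hqi, Nat.ne_of_lt hi, Nat.not_lt.mpr (le_of_lt hi)]
      have hlt : q ^^^ 2 ^ k < 2 ^ k := by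
        rw [hxq]
        exact Nat.mod_lt _ (by positivity)
      have hq' : q = (q ^^^ 2 ^ k) ^^^ 2 ^ k := by
        rw [Nat.xor_assoc, Nat.xor_self, Nat.xor_zero]
      have h1 : f (q ^^^ 2 ^ k) = g (q ^^^ 2 ^ k) := ih (by omega) _ hlt
      have h2 : f (2 ^ k) = g (2 ^ k) := hbase k (by omega)
      calc f q = f ((q ^^^ 2 ^ k) ^^^ 2 ^ k) := by rw [← hq']
        _ = f (q ^^^ 2 ^ k) ^^^ f (2 ^ k) := hfx _ _
        _ = g (q ^^^ 2 ^ k) ^^^ g (2 ^ k) := by rw [h1, h2]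
        _ = g ((q ^^^ 2 ^ k) ^^^ 2 ^ k) := (hgx _ _).symm
        _ = g q := by rw [← hq']

set_option maxRecDepth 40000 in
theorem mulxIter32_base : ∀ j, j < 32 →
    mulxIter 32 (2 ^ j) = SN (2 ^ j) 0xdb710641 32 := by decide

theorem mulxIter32_eq {q : Nat} (hq : q < 2 ^ 32) :
    mulxIter 32 q = pmulN q 0xdb710641 := by
  refine linear_ext (mulxIter 32) (fun q => pmulN q 0xdb710641)
    (mulxIter_zero' 32) (pmulN_zero_left _)
    (mulxIter_xor 32) (fun x y => pmulN_xor_left x y _)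
    (fun j hj => ?_) q hq
  rw [mulxIter32_base j hj, ← pmulN_eq_SN _ 32 _ (by norm_num)]

-- multiplication commutes with one doubling of the second factor
theorem pmulN_pmulx {q v : Nat} (hq : q < 2 ^ 32) (hv : v < 2 ^ 32) :
    pmulN q (pmulx v) = pmulx (pmulN q v) := by
  have hmod : (v <<< 1) &&& 0xFFFFFFFF = (v <<< 1) % 2 ^ 32 := by
    have := Nat.and_two_pow_sub_one_eq_mod (v <<< 1) 32
    norm_num at this ⊢
    exact this
  have hshift : SN q ((v <<< 1) &&& 0xFFFFFFFF) 32 =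
      (List.range 31).foldr
        (fun i acc => (if v.testBit i then mulxIter (i + 1) q else 0) ^^^ acc) 0 := by
    unfold SN
    rw [List.range_succ_eq_map, List.foldr_cons, List.foldr_map]
    have h0 : ((v <<< 1) &&& 0xFFFFFFFF).testBit 0 = false := by
      rw [hmod, Nat.testBit_mod_two_pow, Nat.testBit_shiftLeft]
      simp
    rw [h0]
    simp only [if_false, Bool.false_eq_true]
    rw [Nat.zero_xor]
    apply foldr_xor_congr
    intro i hi
    have hb : ((v <<< 1) &&& 0xFFFFFFFF).testBit (i + 1) = v.testBit i := by
      have hi31 : i + 1 < 32 := by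
        have := List.mem_range.mp hi
        omega
      rw [hmod, Nat.testBit_mod_two_pow, Nat.testBit_shiftLeft]
      simp [hi31]
    rw [hb]
  have hB : pmulx (SN q v 32) =
      (List.range 32).foldr
        (fun i acc => (if v.testBit i then mulxIter (i + 1) q else 0) ^^^ acc) 0 := by
    unfold SN
    rw [foldr_xor_map _ _ pmulx pmulx_zero pmulx_xor]
    apply foldr_xor_congr
    intro i _
    cases hb : v.testBit i
    · simp [pmulx_zero]
    · simp only [if_true]
      rfl
  have htop : (List.range 32).foldr
      (fun i acc => (if v.testBit i then mulxIter (i + 1) q else 0) ^^^ acc) 0 =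
      (List.range 31).foldr
        (fun i acc => (if v.testBit i then mulxIter (i + 1) q else 0) ^^^ acc) 0 ^^^
        (if v.testBit 31 then mulxIter 32 q else 0) := by
    have : (32 : Nat) = 31 + 1 := rfl
    rw [this, List.range_succ, List.foldr_append]
    simp only [List.foldr_cons, List.foldr_nil, Nat.xor_zero]
    rw [foldr_xor_init]
  calc pmulN q (pmulx v) = SN q (pmulx v) 32 := pmulN_eq_SN q 32 _ (pmulx_lt v)
    _ = SN q ((v <<< 1) &&& 0xFFFFFFFF) 32 ^^^ SN q (if v.testBit 31 then 0xdb710641 else 0) 32 := by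
        rw [← SN_xor_w, ← pmulx_eq]
    _ = (List.range 31).foldr
          (fun i acc => (if v.testBit i then mulxIter (i + 1) q else 0) ^^^ acc) 0 ^^^
          (if v.testBit 31 then mulxIter 32 q else 0) := by
        rw [hshift]
        congr 1
        cases hb : v.testBit 31
        · simp [SN_zero_w]
        · simp only [if_true]
          rw [← pmulN_eq_SN q 32 _ (by norm_num), ← mulxIter32_eq hq]
    _ = pmulx (SN q v 32) := by rw [hB, htop]
    _ = pmulx (pmulN q v) := by rw [pmulN_eq_SN q 32 v hv]

theorem pmulN_mulxIter {q v : Nat} (hq : q < 2 ^ 32) (hv : v < 2 ^ 32) (n : Nat) :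
    pmulN q (mulxIter n v) = mulxIter n (pmulN q v) := by
  induction n with
  | zero => rfl
  | succ n ih =>
    show pmulN q (pmulx (mulxIter n v)) = pmulx (mulxIter n (pmulN q v))
    rw [pmulN_pmulx hq (mulxIter_lt n hv), ih]

-- squaring A's matrix is squaring the polynomial
theorem square_matOf {q : Nat} (hq : q < 2 ^ 32) :
    gf2_matrix_square_port (matOf q) = matOf (pmulN q q) := by
  unfold gf2_matrix_square_port
  show _ = (List.range 32).map (fun n => mulxIter n (pmulN q q))
  refine List.map_congr_left ?_
  intro n hn
  have hn32 : n < 32 := by simpa [List.mem_range] using hn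
  rw [matOf_getD hn32, times_matOf, clmul_port_natCast q (mulxIter_lt n hq),
    pmulN_mulxIter hq hq]

-- two bits of A's interleaved loop are two turns of B's uniform loop
theorem aLoop_eq_bLoop : ∀ n (even : List Nat) (q : Nat) (crc : Int), q < 2 ^ 32 →
    crc32ALoop even (matOf q) crc n = crc32BLoop (pmulN q q) crc n := by
  intro n
  induction n using Nat.strong_induction_on with
  | _ n ih =>
    intro even q crc hq
    rw [crc32ALoop, crc32BLoop]
    by_cases h0 : n = 0
    · simp [h0]
    · simp only [if_neg h0]
      have hp : pmulN q q < 2 ^ 32 := pmulN_lt hq q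
      have hsq : clmul_port (pmulN q q) ((pmulN q q : Nat) : Int) = pmulN (pmulN q q) (pmulN q q) :=
        clmul_port_natCast _ hp
      rw [square_matOf hq, times_matOf, crc32BLoop]
      by_cases h1 : n >>> 1 = 0
      · simp [h1]
      · simp only [if_neg h1]
        rw [square_matOf hp, times_matOf, hsq]
        have hr : pmulN (pmulN q q) (pmulN q q) < 2 ^ 32 := pmulN_lt hp _
        have hsq2 : clmul_port (pmulN (pmulN q q) (pmulN q q))
            ((pmulN (pmulN q q) (pmulN q q) : Nat) : Int) =
            pmulN (pmulN (pmulN q q) (pmulN q q)) (pmulN (pmulN q q) (pmulN q q)) :=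
          clmul_port_natCast _ hr
        rw [hsq2]
        have hsh1 : n >>> 1 = n / 2 := Nat.shiftRight_one n
        have hsh2 : n >>> 1 >>> 1 = n >>> 1 / 2 := Nat.shiftRight_one _
        exact ih (n >>> 1 >>> 1) (by omega) _ _ _ hr

theorem init_matrix_eq :
    ((List.range' 1 31).map (fun n => (1 <<< n : Nat))) ++ [crc32_reciprocal_poly] = matOf 2 := by
  decide

-- ===== VERDICT (by name: the statement is the Claim_ definition above) =====
theorem crc32_subtract_spec : Claim_equal_crc32_subtract := by
  intro crc1 crc2 len2 _
  unfold Spec_crc32_subtract crc32_subtract crc32_subtract_alt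
  by_cases h : len2 = 0
  · simp [h]
  · simp only [if_neg h]
    rw [init_matrix_eq, square_matOf (by norm_num), square_matOf (pmulN_lt (by norm_num) 2),
      aLoop_eq_bLoop _ _ _ _ (pmulN_lt (pmulN_lt (by norm_num) 2) _)]
    have e1 : pmulN 2 2 = 4 := by
      rw [pmulN_eq_SN 2 32 2 (by norm_num)]
      decide
    have e2 : pmulN 4 4 = 16 := by
      rw [pmulN_eq_SN 4 32 4 (by norm_num)]
      decide
    have e3 : pmulN 16 16 = 256 := by
      rw [pmulN_eq_SN 16 32 16 (by norm_num)]
      decide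
    rw [e1, e2, e3]
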